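-- pv_equiv track=rewrite | github.com/dio4/vista_1 | library/TNMS/Utils.py | convertTNMSStringToDict
-- ===== SOURCE A (Python) =====
-- prefixes = ['c', 'p', 'r', 'y', 'yc', 'yp', 'a']
--
-- categories = ['T', 'N', 'M', 'M1Loc', 'S', 'G', 'L', 'V', 'Pn', 'R', 'St']
--
-- def isThis(entry, key):
--     if not entry.startswith(key):
--         return False
--     if key == 'M' and 'Loc' in entry:
--         return False
--     return True
--
-- def convertTNMSStringToDict(s):
--     result = {}
--     entries = s.split(' ')
--     for prefix in prefixes:
--         for category in categories:
--             key = prefix + category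
--             for entry in entries:
--                 if isThis(entry, key):
--                     result[key] = entry[len(key):]
--                     break
--     return result
-- ===== SOURCE B (Python) =====
-- prefixes = ['c', 'p', 'r', 'y', 'yc', 'yp', 'a']
--
-- categories = ['T', 'N', 'M', 'M1Loc', 'S', 'G', 'L', 'V', 'Pn', 'R', 'St']
--
-- KEYS = [p + c for p in prefixes for c in categories]
--
-- def convertTNMSStringToDict(s):
--     # single pass over the entries in order; first entry wins per key
--     found = {}
--     for entry in s.split(' '):
--         for key in KEYS:
--             if key not in found and entry.startswith(key):
--                 found[key] = entry[len(key):]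
--     # emit in canonical key order (= A's insertion order)
--     return {key: found[key] for key in KEYS if key in found}
-- ===== Notes on version B (the rewrite author's own statement) =====
-- stated objective: alternative
-- what changed: A loops key-by-key over the 77 prefix+category keys and rescans the entry list for each key with a break; B makes a single pass over the entries in their original order filling a first-match table, then emits the table in canonical key order.
import Mathlib
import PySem

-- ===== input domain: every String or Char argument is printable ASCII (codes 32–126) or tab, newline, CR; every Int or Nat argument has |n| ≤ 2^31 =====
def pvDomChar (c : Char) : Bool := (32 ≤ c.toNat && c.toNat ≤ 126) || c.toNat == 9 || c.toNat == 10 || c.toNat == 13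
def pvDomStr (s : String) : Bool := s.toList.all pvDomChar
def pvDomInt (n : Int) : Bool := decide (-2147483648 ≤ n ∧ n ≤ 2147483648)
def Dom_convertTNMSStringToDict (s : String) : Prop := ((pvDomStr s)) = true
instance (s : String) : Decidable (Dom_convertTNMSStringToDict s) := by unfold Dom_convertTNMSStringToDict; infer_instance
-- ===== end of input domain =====

-- B replaces A's key-outer triple loop (77 rescans of the entry list with a break)
-- by a single pass over the entries filling a first-match table, then emits the
-- table in canonical key order; objective: alternative decomposition, same cost.

-- ===== PORT A =====
def prefixesA : List String := ["c", "p", "r", "y", "yc", "yp", "a"]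

def categoriesA : List String := ["T", "N", "M", "M1Loc", "S", "G", "L", "V", "Pn", "R", "St"]

def isThisA (entry key : String) : Bool :=
  if ¬ (PySem.Str.startswith entry key) then false
  else if key = "M" && PySem.Str.isIn "Loc" entry then false
  else true

-- the 'for entry in entries: … break' inner loop of A
def findEntryLoopA (result : PySem.Dict String String) (key : String) :
    List String → PySem.Dict String String
  | [] => result
  | e :: rest =>
      if isThisA e key then result.insert key (PySem.Str.slice e (some (PySem.Str.len key)) none)
      else findEntryLoopA result key rest

def convertTNMSStringToDict (s : String) : List (String × String) :=
  let entries := (PySem.Str.split? s " ").getD []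
  let result := prefixesA.foldl (fun result prefixv =>
    categoriesA.foldl (fun result category =>
      findEntryLoopA result (prefixv ++ category) entries) result) PySem.Dict.empty
  result.items

-- ===== PORT B =====
def keysB : List String := prefixesA.flatMap (fun p => categoriesA.map (fun c => p ++ c))

def convertTNMSStringToDict_alt (s : String) : List (String × String) :=
  let found := ((PySem.Str.split? s " ").getD []).foldl (fun found entry =>
    keysB.foldl (fun found key =>
      if !found.contains key && PySem.Str.startswith entry key then
        found.insert key (PySem.Str.slice entry (some (PySem.Str.len key)) none)
      else found) found) PySem.Dict.empty
  (keysB.foldl (fun d key =>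
    if found.contains key then d.insert key (found.getD key "") else d)
    (PySem.Dict.empty : PySem.Dict String String)).items

-- ===== PRECONDITION & SPEC =====
def Spec_convertTNMSStringToDict (s : String) (out : List (String × String)) : Prop := out = convertTNMSStringToDict_alt s
instance (s : String) (out : List (String × String)) : Decidable (Spec_convertTNMSStringToDict s out) := by unfold Spec_convertTNMSStringToDict; infer_instance

-- ===== CLAIM (what is proved, stated in full; the proofs are below) =====
def Claim_equal_convertTNMSStringToDict : Prop := ∀ (s : String), Dom_convertTNMSStringToDict s → Spec_convertTNMSStringToDict s (convertTNMSStringToDict s)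

-- ===== LEMMAS AND PROOFS =====

def pvSuffix (key e : String) : String := PySem.Str.slice e (some (PySem.Str.len key)) none

-- first matching entry of A's inner loop, as an Option-valued function of the key
def pvFirst (entries : List String) (key : String) : Option String :=
  entries.find? (fun e => isThisA e key)

lemma keysB_nodup : keysB.Nodup := by decide

lemma keysB_ne_M : forall k, k ∈ keysB -> k ≠ "M" := by decide

lemma find?_congr_mem {alpha : Type} (l : List alpha) (p q : alpha -> Bool)
    (h : forall x, x ∈ l -> p x = q x) : l.find? p = l.find? q := by
  induction l with
  | nil => rfl
  | cons a rest ih =>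
      rw [List.find?_cons, List.find?_cons, h a (by simp)]
      cases q a
      · exact ih (fun x hx => h x (by simp [hx]))
      · rfl

lemma isThisA_eq_startswith (e k : String) (hk : k ≠ "M") :
    isThisA e k = PySem.Str.startswith e k := by
  unfold isThisA PySem.Str.startswith
  by_cases h : PySem.Chars.startswith e.toList k.toList = true
  · simp [h, hk]
  · simp only [Bool.not_eq_true] at h; simp [h]

lemma findEntryLoopA_eq (d : PySem.Dict String String) (k : String) (es : List String) :
    findEntryLoopA d k es =
      match pvFirst es k with
      | some e => d.insert k (pvSuffix k e)
      | none => d := by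
  induction es with
  | nil => simp [findEntryLoopA, pvFirst]
  | cons e rest ih =>
      by_cases h : isThisA e k = true
      · simp [findEntryLoopA, pvFirst, List.find?, h, pvSuffix]
      · simp only [Bool.not_eq_true] at h
        simp [findEntryLoopA, pvFirst, List.find?, h] at ih ⊢
        exact ih

-- folding an optional insertion over fresh distinct keys appends the found pairs
lemma items_foldl_insert_opt (f : String -> Option String) (ks : List String)
    (d : PySem.Dict String String) (hnd : ks.Nodup)
    (hfresh : forall k, k ∈ ks -> d.contains k = false) :
    (ks.foldl (fun d k => match f k with | some v => d.insert k v | none => d) d).items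
      = d.items ++ ks.filterMap (fun k => (f k).map (fun v => (k, v))) := by
  induction ks generalizing d with
  | nil => simp
  | cons k rest ih =>
      have hk : d.contains k = false := hfresh k (by simp)
      have hnd' : rest.Nodup := hnd.of_cons
      have hne : forall k', k' ∈ rest -> k' ≠ k := fun k' h' hEq =>
        (List.nodup_cons.mp hnd).1 (hEq ▸ h')
      cases hf : f k with
      | none =>
          simp only [List.foldl_cons, hf]
          rw [ih d hnd' (fun k' h' => hfresh k' (by simp [h']))]
          simp [hf]
      | some v =>
          simp only [List.foldl_cons, hf]
          have hfresh' : forall k', k' ∈ rest -> (d.insert k v).contains k' = false := by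
            intro k' h'
            rw [PySem.Dict.contains_insert]
            have := hfresh k' (by simp [h'])
            simp [this, hne k' h']
          rw [ih (d.insert k v) hnd' hfresh']
          rw [PySem.Dict.items_insert_of_not_contains d v hk]
          simp [hf]

-- A's double fold over prefixes x categories is the fold over keysB
lemma A_fold_eq (entries : List String) :
    (prefixesA.foldl (fun result prefixv =>
        categoriesA.foldl (fun result category =>
          findEntryLoopA result (prefixv ++ category) entries) result) PySem.Dict.empty)
    = keysB.foldl (fun d k => findEntryLoopA d k entries) PySem.Dict.empty := by
  rw [keysB, List.foldl_flatMap]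
  simp only [List.foldl_map]

-- effect of B's inner loop (one entry) on a single key lookup
lemma inner_get? (e : String) (ks : List String) (d : PySem.Dict String String) (k : String) :
    (ks.foldl (fun found key =>
        if !found.contains key && PySem.Str.startswith e key then
          found.insert key (pvSuffix key e)
        else found) d).get? k
    = if k ∈ ks ∧ d.get? k = none ∧ PySem.Str.startswith e k then some (pvSuffix k e)
      else d.get? k := by
  induction ks generalizing d with
  | nil => simp
  | cons a rest ih =>
      simp only [List.foldl_cons]
      by_cases hstep : (!d.contains a && PySem.Str.startswith e a) = true
      · rw [if_pos hstep, ih]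
        simp only [Bool.and_eq_true, Bool.not_eq_true'] at hstep
        by_cases hka : k = a
        · subst hka
          have hdk : d.get? k = none := (PySem.Dict.get?_eq_none_iff_contains d k).mpr hstep.1
          rw [PySem.Dict.get?_insert_self]
          rw [if_neg (by rintro ⟨-, h, -⟩; simp at h)]
          rw [if_pos ⟨by simp, hdk, hstep.2⟩]
        · rw [PySem.Dict.get?_insert_of_ne d (pvSuffix a e) hka]
          by_cases hmem : k ∈ rest
          · simp [hmem, hka]
          · simp [hmem, hka]
      · rw [if_neg hstep, ih]
        by_cases hka : k = a
        · subst hka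
          by_cases hdk : d.get? k = none
          · have hc : d.contains k = false := (PySem.Dict.get?_eq_none_iff_contains d k).mp hdk
            have hsw : ¬ (PySem.Str.startswith e k = true) := fun h => hstep (by rw [hc, h]; rfl)
            rw [if_neg (by rintro ⟨-, -, h⟩; exact hsw h)]
            rw [if_neg (by rintro ⟨-, -, h⟩; exact hsw h)]
          · rw [if_neg (by rintro ⟨-, h, -⟩; exact hdk h)]
            rw [if_neg (by rintro ⟨-, h, -⟩; exact hdk h)]
        · by_cases hmem : k ∈ rest
          · simp [hmem, hka]
          · simp [hmem, hka]

-- B's entry pass computes the first matching entry per key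
lemma outer_get? (es : List String) (d : PySem.Dict String String) (k : String)
    (hk : k ∈ keysB) :
    (es.foldl (fun found entry =>
        keysB.foldl (fun found key =>
          if !found.contains key && PySem.Str.startswith entry key then
            found.insert key (pvSuffix key entry)
          else found) found) d).get? k
    = match d.get? k with
      | some v => some v
      | none => (es.find? (fun e => PySem.Str.startswith e k)).map (fun e => pvSuffix k e) := by
  induction es generalizing d with
  | nil => cases h : d.get? k <;> simp [h]
  | cons e rest ih =>
      simp only [List.foldl_cons]
      rw [ih, inner_get? e keysB d k]
      cases hdk : d.get? k with
      | some v =>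
          rw [if_neg (by rintro ⟨-, h, -⟩; simp at h)]
      | none =>
          by_cases hsw : PySem.Str.startswith e k = true
          · rw [if_pos ⟨hk, rfl, hsw⟩]
            have hsw' : PySem.Chars.startswith e.toList k.toList = true := hsw
            simp [hsw']
          · simp only [Bool.not_eq_true] at hsw
            rw [if_neg (by rintro ⟨-, -, h⟩; rw [hsw] at h; exact absurd h (by decide))]
            have hsw' : PySem.Chars.startswith e.toList k.toList = false := hsw
            simp [hsw']

lemma b_emit_step (found : PySem.Dict String String) (k : String) (d : PySem.Dict String String) :
    (if found.contains k then d.insert k (found.getD k "") else d)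
    = match found.get? k with | some v => d.insert k v | none => d := by
  cases h : found.get? k with
  | some v =>
      have hc : found.contains k = true := by
        rw [PySem.Dict.contains_eq_isSome_get?, h]; rfl
      rw [if_pos hc, PySem.Dict.getD_eq_get?_getD, h]; rfl
  | none =>
      have hc : found.contains k = false := (PySem.Dict.get?_eq_none_iff_contains found k).mp h
      simp [hc]

-- ===== VERDICT (by name: the statement is the Claim_ definition above) =====
theorem convertTNMSStringToDict_spec : Claim_equal_convertTNMSStringToDict := by
  intro s _
  unfold Spec_convertTNMSStringToDict convertTNMSStringToDict convertTNMSStringToDict_alt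
  dsimp only
  set entries := (PySem.Str.split? s " ").getD [] with hentries
  rw [A_fold_eq entries]
  rw [PySem.List.foldl_congr_mem keysB _
        (fun d k => match (pvFirst entries k).map (fun e => pvSuffix k e) with
                    | some v => d.insert k v
                    | none => d)
        PySem.Dict.empty
        (fun d k _ => by rw [findEntryLoopA_eq]; cases h : pvFirst entries k <;> simp [h])]
  rw [items_foldl_insert_opt (fun k => (pvFirst entries k).map (fun e => pvSuffix k e)) keysB
        PySem.Dict.empty keysB_nodup (fun k _ => PySem.Dict.contains_empty k)]
  set found := entries.foldl (fun found entry =>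
      keysB.foldl (fun found key =>
        if !found.contains key && PySem.Str.startswith entry key then
          found.insert key (PySem.Str.slice entry (some (PySem.Str.len key)) none)
        else found) found) PySem.Dict.empty with hfound
  rw [PySem.List.foldl_congr_mem keysB _
        (fun d k => match found.get? k with
                    | some v => d.insert k v
                    | none => d)
        PySem.Dict.empty
        (fun d k _ => b_emit_step found k d)]
  rw [items_foldl_insert_opt (fun k => found.get? k) keysB
        PySem.Dict.empty keysB_nodup (fun k _ => PySem.Dict.contains_empty k)]
  simp only [PySem.Dict.empty, List.nil_append]
  apply List.filterMap_congr
  intro k hk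
  have h1 : found.get? k
      = (entries.find? (fun e => PySem.Str.startswith e k)).map (fun e => pvSuffix k e) := by
    rw [hfound]
    have := outer_get? entries PySem.Dict.empty k hk
    simpa [pvSuffix, PySem.Dict.get?_empty] using this
  rw [h1]
  have h2 : pvFirst entries k = entries.find? (fun e => PySem.Str.startswith e k) := by
    unfold pvFirst
    exact find?_congr_mem entries _ _ (fun e _ => isThisA_eq_startswith e k (keysB_ne_M k hk))
  rw [h2]
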